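-- pv_equiv track=rewrite | github.com/mousdid/open_avenues_build_medical_nlp | src/utils/finetuning.py | bioes_from_chunks
-- ===== SOURCE A (Python) =====
-- def bioes_from_chunks(chunk_labels):
--     N = len(chunk_labels)
--     tags = ["O"] * N
--     i = 0
--     while i < N:
--         sec = chunk_labels[i]
--         if sec is None:
--             tags[i] = "O"
--             i += 1
--         else:
--             j = i + 1
--             while j < N and chunk_labels[j] == sec:
--                 j += 1
--             length = j - i
--             if length == 1:
--                 tags[i] = f"S-{sec}"
--             elif length == 2:
--                 tags[i] = f"B-{sec}"
--                 tags[i + 1] = f"E-{sec}"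
--             else:
--                 tags[i] = f"B-{sec}"
--                 for k in range(i + 1, j - 1):
--                     tags[k] = f"I-{sec}"
--                 tags[j - 1] = f"E-{sec}"
--             i = j
--     return tags
-- ===== SOURCE B (Python) =====
-- def bioes_from_chunks(chunk_labels):
--     N = len(chunk_labels)
--     tags = []
--     for i in range(N):
--         sec = chunk_labels[i]
--         if sec is None:
--             tags.append("O")
--             continue
--         has_prev = i > 0 and chunk_labels[i - 1] == sec
--         has_next = i < N - 1 and chunk_labels[i + 1] == sec
--         if has_prev:
--             tags.append(f"I-{sec}" if has_next else f"E-{sec}")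
--         else:
--             tags.append(f"B-{sec}" if has_next else f"S-{sec}")
--     return tags
-- ===== Notes on version B (the rewrite author's own statement) =====
-- stated objective: simpler
-- what changed: Replaces A's run-finding nested while-loops and segment-length case split by a single for-loop that classifies each position as O/S/B/I/E from whether its two neighbours carry the same label.
import Mathlib
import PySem

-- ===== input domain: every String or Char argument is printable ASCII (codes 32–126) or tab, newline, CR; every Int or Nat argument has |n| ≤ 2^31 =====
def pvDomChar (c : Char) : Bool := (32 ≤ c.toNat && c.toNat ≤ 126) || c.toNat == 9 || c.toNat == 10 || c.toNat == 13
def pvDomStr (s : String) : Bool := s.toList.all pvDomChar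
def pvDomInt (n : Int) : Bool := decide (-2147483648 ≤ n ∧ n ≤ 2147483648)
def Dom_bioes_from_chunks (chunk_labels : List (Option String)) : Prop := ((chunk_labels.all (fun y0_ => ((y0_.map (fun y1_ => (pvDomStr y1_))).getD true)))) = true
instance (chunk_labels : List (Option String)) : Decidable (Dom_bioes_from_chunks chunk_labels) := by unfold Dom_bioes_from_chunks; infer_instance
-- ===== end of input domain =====

-- B replaces A's run-finding nested while-loops by a single pass classifying each
-- position from its two neighbours (objective: simpler; same O(n) cost).

-- ===== PORT A =====
-- inner while loop 'while j < N and chunk_labels[j] == sec: j += 1' (run length after i)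
def pvRunLen (sec : Option String) : List (Option String) → Nat
  | [] => 0
  | x :: xs => if x == sec then pvRunLen sec xs + 1 else 0

-- the length==1 / ==2 / else branches; the inner 'for k in range(i+1, j-1)' writes
-- the I-tags, ported as List.replicate (in-order, non-overlapping writes)
def pvEmitRun (sec : String) (len : Nat) : List String :=
  if len = 1 then ["S-" ++ sec]
  else if len = 2 then ["B-" ++ sec, "E-" ++ sec]
  else ("B-" ++ sec) :: (List.replicate (len - 2) ("I-" ++ sec) ++ ["E-" ++ sec])

-- A's outer while loop: A fills tags[i..j-1] left to right and jumps i := j, so the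
-- in-place array writes are ported as emitting each run's tags and recursing on the rest
def bioes_from_chunks (chunk_labels : List (Option String)) : List String :=
  match chunk_labels with
  | [] => []
  | none :: rest => "O" :: bioes_from_chunks rest
  | some sec :: rest =>
      let l := pvRunLen (some sec) rest
      pvEmitRun sec (l + 1) ++ bioes_from_chunks (rest.drop l)
termination_by chunk_labels.length
decreasing_by all_goals simp [List.length_drop]

-- ===== PORT B =====
def pvTagAt (cl : List (Option String)) (i : Nat) : String :=
  match cl.getD i none with
  | none => "O"
  | some sec =>
    let hasPrev := decide (0 < i) && (cl.getD (i - 1) none == some sec)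
    let hasNext := decide (i + 1 < cl.length) && (cl.getD (i + 1) none == some sec)
    if hasPrev then (if hasNext then "I-" ++ sec else "E-" ++ sec)
    else (if hasNext then "B-" ++ sec else "S-" ++ sec)

def bioes_from_chunks_alt (chunk_labels : List (Option String)) : List String :=
  (List.range chunk_labels.length).map (pvTagAt chunk_labels)

-- ===== PRECONDITION & SPEC =====
def Spec_bioes_from_chunks (chunk_labels : List (Option String)) (out : List String) : Prop := out = bioes_from_chunks_alt chunk_labels
instance (chunk_labels : List (Option String)) (out : List String) : Decidable (Spec_bioes_from_chunks chunk_labels out) := by unfold Spec_bioes_from_chunks; infer_instance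

-- ===== CLAIM (what is proved, stated in full; the proofs are below) =====
def Claim_equal_bioes_from_chunks : Prop := ∀ (chunk_labels : List (Option String)), Dom_bioes_from_chunks chunk_labels → Spec_bioes_from_chunks chunk_labels (bioes_from_chunks chunk_labels)

-- ===== LEMMAS AND PROOFS =====

-- context-passing formulation of B: classify each element from its predecessor and successor
def pvTagOf (prev cur next : Option String) : String :=
  match cur with
  | none => "O"
  | some sec =>
    if prev == some sec then (if next == some sec then "I-" ++ sec else "E-" ++ sec)
    else (if next == some sec then "B-" ++ sec else "S-" ++ sec)

def pvTagsFrom (prev : Option String) : List (Option String) → List String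
  | [] => []
  | x :: xs => pvTagOf prev x (xs.head?.getD none) :: pvTagsFrom x xs

theorem pvGetD_append_mid (pre : List (Option String)) (x : Option String)
    (rest : List (Option String)) : (pre ++ x :: rest).getD pre.length none = x := by
  induction pre with
  | nil => rfl
  | cons a t ih => simp

theorem pvGetD_append_pred (pre rest : List (Option String)) (h : pre ≠ []) :
    (pre ++ rest).getD (pre.length - 1) none = pre.getLast?.getD none := by
  induction pre with
  | nil => exact absurd rfl h
  | cons a t ih =>
    cases t with
    | nil => rfl
    | cons b t' =>
      have := ih (by simp)
      simpa [List.getD, List.length_cons, Nat.succ_sub_one] using this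

theorem pvTagAt_head (pre : List (Option String)) (x : Option String)
    (xs : List (Option String)) :
    pvTagAt (pre ++ x :: xs) pre.length = pvTagOf (pre.getLast?.getD none) x (xs.head?.getD none) := by
  unfold pvTagAt pvTagOf
  rw [pvGetD_append_mid]
  cases x with
  | none => rfl
  | some sec =>
    have hprev : (decide (0 < pre.length) && ((pre ++ some sec :: xs).getD (pre.length - 1) none == some sec))
        = (pre.getLast?.getD none == some sec) := by
      cases pre with
      | nil => simp
      | cons a t =>
        rw [pvGetD_append_pred (a :: t) (some sec :: xs) (by simp)]
        simp
    have hnext : (decide (pre.length + 1 < (pre ++ some sec :: xs).length) && ((pre ++ some sec :: xs).getD (pre.length + 1) none == some sec))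
        = (xs.head?.getD none == some sec) := by
      cases xs with
      | nil => simp
      | cons y ys =>
        have : (pre ++ some sec :: y :: ys).getD (pre.length + 1) none = y := by
          have := pvGetD_append_mid (pre ++ [some sec]) y ys
          simp only [List.append_assoc] at this
          simp only [List.cons_append, List.nil_append, List.length_append,
            List.length_cons, List.length_nil] at this
          exact this
        rw [this]
        simp [List.length_append]
    simp only [hprev, hnext]

theorem pvIdxGen (xs : List (Option String)) :
    ∀ pre : List (Option String),
      (List.range' pre.length xs.length).map (pvTagAt (pre ++ xs))
        = pvTagsFrom (pre.getLast?.getD none) xs := by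
  induction xs with
  | nil => intro pre; simp [pvTagsFrom]
  | cons x xs ih =>
    intro pre
    rw [List.length_cons, List.range'_succ, List.map_cons]
    have htail := ih (pre ++ [x])
    rw [List.append_assoc] at htail
    simp only [List.length_append, List.length_cons, List.length_nil] at htail
    have hlast : (pre ++ [x]).getLast?.getD none = x := by simp
    rw [hlast] at htail
    rw [pvTagsFrom, ← pvTagAt_head pre x xs]
    simp only [List.cons_append, List.nil_append] at htail ⊢
    rw [htail]

theorem pvAlt_eq_tagsFrom (cl : List (Option String)) :
    bioes_from_chunks_alt cl = pvTagsFrom none cl := by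
  have := pvIdxGen cl []
  simpa [bioes_from_chunks_alt, List.range_eq_range'] using this

theorem pvRunLen_stop (s : String) (xs : List (Option String)) :
    (xs.drop (pvRunLen (some s) xs)).head?.getD none ≠ some s := by
  induction xs with
  | nil => simp
  | cons x t ih =>
    by_cases hx : x == some s
    · simpa [pvRunLen, hx] using ih
    · simp only [pvRunLen, hx]
      simpa using fun h => hx (by simp [h])

theorem pvEmitRun_ge2 (sec : String) (m : Nat) :
    pvEmitRun sec (m + 2) = ("B-" ++ sec) :: (List.replicate m ("I-" ++ sec) ++ ["E-" ++ sec]) := by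
  unfold pvEmitRun
  cases m with
  | zero => simp
  | succ k => simp

theorem pvRunMid (xs : List (Option String)) (sec : String) :
    pvTagsFrom (some sec) (some sec :: xs)
      = List.replicate (pvRunLen (some sec) xs) ("I-" ++ sec)
          ++ ("E-" ++ sec) :: pvTagsFrom (some sec) (xs.drop (pvRunLen (some sec) xs)) := by
  induction xs with
  | nil => simp [pvTagsFrom, pvTagOf, pvRunLen]
  | cons x t ih =>
    by_cases hx : x == some sec
    · have hxe : x = some sec := by simpa using hx
      subst hxe
      rw [pvTagsFrom]
      simp only [pvRunLen, hx, if_pos, List.head?, Option.getD]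
      rw [ih]
      simp [pvTagOf, List.replicate_succ]
    · rw [pvTagsFrom]
      have hx' : (x == some sec) = false := by simpa using hx
      simp [pvRunLen, hx', pvTagOf, List.head?]

theorem pvRunStart (xs : List (Option String)) (sec : String) (prev : Option String)
    (hp : (prev == some sec) = false) :
    pvTagsFrom prev (some sec :: xs)
      = pvEmitRun sec (pvRunLen (some sec) xs + 1)
          ++ pvTagsFrom (some sec) (xs.drop (pvRunLen (some sec) xs)) := by
  cases xs with
  | nil => simp [pvTagsFrom, pvTagOf, pvRunLen, pvEmitRun, hp]
  | cons x t =>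
    by_cases hx : x == some sec
    · have hxe : x = some sec := by simpa using hx
      subst hxe
      rw [pvTagsFrom]
      simp only [pvRunLen, hx, if_pos]
      rw [pvRunMid]
      rw [pvEmitRun_ge2]
      simp [pvTagOf, hp, List.head?]
    · have hx' : (x == some sec) = false := by simpa using hx
      rw [pvTagsFrom]
      simp [pvRunLen, hx', pvTagOf, hp, pvEmitRun, List.head?]

theorem pvMain (n : Nat) : ∀ (xs : List (Option String)) (prev : Option String),
    xs.length ≤ n →
    (∀ s : String, xs.head?.getD none = some s → (prev == some s) = false) →
    pvTagsFrom prev xs = bioes_from_chunks xs := by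
  induction n with
  | zero =>
    intro xs prev hlen _
    have : xs = [] := List.length_eq_zero_iff.mp (Nat.le_zero.mp hlen)
    subst this
    rw [pvTagsFrom, bioes_from_chunks]
  | succ k ih =>
    intro xs prev hlen hc
    match xs with
    | [] => rw [pvTagsFrom, bioes_from_chunks]
    | none :: rest =>
      rw [pvTagsFrom, bioes_from_chunks]
      have : pvTagOf prev none (rest.head?.getD none) = "O" := rfl
      rw [this]
      congr 1
      exact ih rest none (by simpa using Nat.le_of_succ_le_succ (by simpa using hlen))
        (fun s _ => by simp)
    | some sec :: rest =>
      have hp : (prev == some sec) = false := hc sec (by simp [List.head?])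
      rw [pvRunStart rest sec prev hp, bioes_from_chunks]
      congr 1
      apply ih
      · have h1 : rest.length ≤ k := by simpa using Nat.le_of_succ_le_succ (by simpa using hlen)
        calc (rest.drop (pvRunLen (some sec) rest)).length ≤ rest.length := by
              simp [List.length_drop]
          _ ≤ k := h1
      · intro s hs
        by_cases he : sec = s
        · subst he
          exact absurd hs (pvRunLen_stop sec rest)
        · simp [he]

-- ===== VERDICT (by name: the statement is the Claim_ definition above) =====
theorem bioes_from_chunks_spec : Claim_equal_bioes_from_chunks := by
  intro cl _
  unfold Spec_bioes_from_chunks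
  rw [pvAlt_eq_tagsFrom]
  exact (pvMain cl.length cl none le_rfl (fun s _ => by simp)).symm
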